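-- pv_equiv track=rewrite | github.com/hanna5020/mysite | mysite/leetcod2.py | solution
-- ===== SOURCE A (Python) =====
-- def solution(R, V):
--     # 初始化银行 A 和 B 的余额
--     balance_A = 0
--     balance_B = 0
--
--     # 记录银行 A 和 B 的最低余额
--     min_balance_A = 0
--     min_balance_B = 0
--
--     # 遍历每个转账
--     for i in range(len(R)):
--         if R[i] == 'B':
--             balance_A -= V[i]  # A 向 B 转账
--             balance_B += V[i]
--         else:
--             balance_B -= V[i]  # B 向 A 转账
--             balance_A += V[i]
--
--         # 更新最低余额
--         min_balance_A = min(min_balance_A, balance_A)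
--         min_balance_B = min(min_balance_B, balance_B)
--
--     # 计算所需的初始余额
--     initial_balance_A = -min_balance_A if min_balance_A < 0 else 0
--     initial_balance_B = -min_balance_B if min_balance_B < 0 else 0
--
--     return [initial_balance_A, initial_balance_B]
-- ===== SOURCE B (Python) =====
-- def solution(R, V):
--     # Backward pass: a (resp. b) is the initial balance bank A (resp. B) needs
--     # for the suffix of transfers starting at i; the recurrence
--     # need(i) = max(0, need(i+1) -/+ V[i]) folds the sequence back-to-front,
--     # no running balances or running minima are kept at all.
--     a = 0
--     b = 0
--     for i in range(len(R) - 1, -1, -1):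
--         if R[i] == 'B':
--             a = max(0, a + V[i])
--             b = max(0, b - V[i])
--         else:
--             a = max(0, a - V[i])
--             b = max(0, b + V[i])
--     return [a, b]
-- ===== Notes on version B (the rewrite author's own statement) =====
-- stated objective: alternative
-- what changed: Instead of a forward simulation keeping two running balances and their running minima, B folds the transfer list back-to-front with the recurrence need(i) = max(0, need(i+1) -/+ V[i]), computing each bank's required initial balance for the remaining suffix directly, with no balances or minima at all.
import Mathlib
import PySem

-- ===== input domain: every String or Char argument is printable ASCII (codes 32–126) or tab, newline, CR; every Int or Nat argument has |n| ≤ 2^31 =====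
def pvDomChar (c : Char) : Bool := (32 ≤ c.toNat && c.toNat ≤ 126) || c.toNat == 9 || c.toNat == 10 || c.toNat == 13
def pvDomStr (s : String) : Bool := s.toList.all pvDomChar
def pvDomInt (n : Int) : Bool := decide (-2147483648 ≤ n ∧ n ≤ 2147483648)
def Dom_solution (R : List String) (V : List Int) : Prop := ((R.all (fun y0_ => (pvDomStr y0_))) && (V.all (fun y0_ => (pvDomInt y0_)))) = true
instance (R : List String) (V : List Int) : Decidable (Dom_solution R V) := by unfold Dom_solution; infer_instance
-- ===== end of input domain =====

-- B replaces A's forward simulation (two running balances + two running minima) by a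
-- backward fold need(i) = max(0, need(i+1) ∓ V[i]) computing the required initial
-- balances for each suffix directly; return-value equivalence, no side effects.

-- ===== PORT A =====
-- state: (balance_A, balance_B, min_balance_A, min_balance_B)
def solutionStepA (R : List String) (V : List Int) (s : Int × Int × Int × Int) (i : Int) :
    Int × Int × Int × Int :=
  let v := PySem.List.pyGetD V i 0
  let r := PySem.List.pyGetD R i ""
  let bA := if r == "B" then s.1 - v else s.1 + v
  let bB := if r == "B" then s.2.1 + v else s.2.1 - v
  (bA, bB, min s.2.2.1 bA, min s.2.2.2 bB)

def solution (R : List String) (V : List Int) : List Int :=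
  let s := (PySem.List.pyRange 0 R.length 1).foldl (solutionStepA R V) (0, 0, 0, 0)
  [if s.2.2.1 < 0 then -s.2.2.1 else 0, if s.2.2.2 < 0 then -s.2.2.2 else 0]

-- ===== PORT B =====
-- state: (a, b) = required initial balances for the suffix processed so far
def solutionStepB (R : List String) (V : List Int) (p : Int × Int) (i : Int) : Int × Int :=
  let v := PySem.List.pyGetD V i 0
  if PySem.List.pyGetD R i "" == "B" then (max 0 (p.1 + v), max 0 (p.2 - v))
  else (max 0 (p.1 - v), max 0 (p.2 + v))

def solution_alt (R : List String) (V : List Int) : List Int :=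
  let p := (PySem.List.pyRange ((R.length : Int) - 1) (-1) (-1)).foldl (solutionStepB R V) (0, 0)
  [p.1, p.2]

-- ===== PRECONDITION & SPEC =====
-- Pre_ excludes only inputs where A (and B alike) raises IndexError: V shorter than R.
def Pre_solution (R : List String) (V : List Int) : Prop := R.length ≤ V.length
instance (R : List String) (V : List Int) : Decidable (Pre_solution R V) := by
  unfold Pre_solution; infer_instance
def pvWitness_solution : List String × List Int := (["B", "A"], [3, 5])

def Spec_solution (R : List String) (V : List Int) (out : List Int) : Prop := out = solution_alt R V
instance (R : List String) (V : List Int) (out : List Int) : Decidable (Spec_solution R V out) := by unfold Spec_solution; infer_instance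

-- ===== CLAIM =====
def Claim_equal_solution : Prop := ∀ (R : List String) (V : List Int), Dom_solution R V → Pre_solution R V → Spec_solution R V (solution R V)

-- ===== LEMMAS AND PROOFS =====

-- net change of bank A's balance at step i
def pvDelta (R : List String) (V : List Int) (i : Int) : Int :=
  if PySem.List.pyGetD R i "" == "B" then -(PySem.List.pyGetD V i 0) else PySem.List.pyGetD V i 0

-- A's fold, rewritten over the delta list: (bal, lowA, lowB) with balance_B = -bal
def pvStepAB (s : Int × Int × Int) (d : Int) : Int × Int × Int :=
  (s.1 + d, min s.2.1 (s.1 + d), min s.2.2 (-(s.1 + d)))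

-- min over prefix sums (incl. empty) of L resp. of (-1) * L
def pvM (L : List Int) : Int := L.foldr (fun d acc => min 0 (d + acc)) 0
def pvMB (L : List Int) : Int := L.foldr (fun d acc => min 0 (-d + acc)) 0

-- B's fold, rewritten over the delta list
def pvNeed (L : List Int) : Int × Int :=
  L.foldr (fun d p => (max 0 (p.1 - d), max 0 (p.2 + d))) (0, 0)

theorem pvM_nonpos (L : List Int) : pvM L ≤ 0 := by
  cases L with
  | nil => simp [pvM]
  | cons d t => simp only [pvM, List.foldr_cons]; exact min_le_left _ _

theorem pvMB_nonpos (L : List Int) : pvMB L ≤ 0 := by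
  cases L with
  | nil => simp [pvMB]
  | cons d t => simp only [pvMB, List.foldr_cons]; exact min_le_left _ _

theorem pvM_cons (d : Int) (t : List Int) : pvM (d :: t) = min 0 (d + pvM t) := rfl
theorem pvMB_cons (d : Int) (t : List Int) : pvMB (d :: t) = min 0 (-d + pvMB t) := rfl
theorem pvNeed_cons (d : Int) (t : List Int) :
    pvNeed (d :: t) = (max 0 ((pvNeed t).1 - d), max 0 ((pvNeed t).2 + d)) := rfl

theorem pvStepA_eq (R : List String) (V : List Int) (i bal lA lB : Int) :
    solutionStepA R V (bal, -bal, lA, lB) i =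
      (bal + pvDelta R V i, -(bal + pvDelta R V i),
       min lA (bal + pvDelta R V i), min lB (-(bal + pvDelta R V i))) := by
  by_cases h : PySem.List.pyGetD R i "" == "B" <;>
    simp [solutionStepA, pvDelta, h, Prod.ext_iff] <;> omega

theorem pvFoldA_eq (R : List String) (V : List Int) (I : List Int) :
    ∀ (bal lA lB : Int),
      I.foldl (solutionStepA R V) (bal, -bal, lA, lB) =
        (let s := (I.map (pvDelta R V)).foldl pvStepAB (bal, lA, lB);
         (s.1, -s.1, s.2.1, s.2.2)) := by
  induction I with
  | nil => intro bal lA lB; rfl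
  | cons i t ih =>
    intro bal lA lB
    simp only [List.foldl_cons, List.map_cons, pvStepA_eq]
    exact ih (bal + pvDelta R V i) _ _

theorem pvFoldAB_eq (L : List Int) :
    ∀ (bal lA lB : Int), lA ≤ bal → lB ≤ -bal →
      L.foldl pvStepAB (bal, lA, lB) =
        (bal + L.sum, min lA (bal + pvM L), min lB (-bal + pvMB L)) := by
  induction L with
  | nil =>
    intro bal lA lB h1 h2
    simp only [pvM, pvMB, List.foldl_nil, List.sum_nil, List.foldr_nil, add_zero]
    refine Prod.ext rfl (Prod.ext ?_ ?_) <;> simp only [min_def] <;> split_ifs <;> omega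
  | cons d t ih =>
    intro bal lA lB h1 h2
    have hm := pvM_nonpos t
    have hmb := pvMB_nonpos t
    simp only [List.foldl_cons, pvStepAB]
    rw [ih (bal + d) _ _ (min_le_right _ _) (min_le_right _ _)]
    simp only [pvM_cons, pvMB_cons, List.sum_cons]
    refine Prod.ext (by ring) (Prod.ext ?_ ?_) <;>
      simp only [min_def] <;> split_ifs <;> omega

theorem pvNeed_eq (L : List Int) : pvNeed L = (-pvM L, -pvMB L) := by
  induction L with
  | nil => rfl
  | cons d t ih =>
    rw [pvNeed_cons, pvM_cons, pvMB_cons, ih]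
    refine Prod.ext ?_ ?_ <;>
      simp only [min_def, max_def] <;> split_ifs <;> omega

theorem pvStepB_eq (R : List String) (V : List Int) (p : Int × Int) (i : Int) :
    solutionStepB R V p i = (max 0 (p.1 - pvDelta R V i), max 0 (p.2 + pvDelta R V i)) := by
  by_cases h : PySem.List.pyGetD R i "" == "B" <;>
    simp [solutionStepB, pvDelta, h, Prod.ext_iff] <;> omega

theorem pvFoldB_eq (R : List String) (V : List Int) (I : List Int) :
    I.foldr (fun i p => solutionStepB R V p i) (0, 0) = pvNeed (I.map (pvDelta R V)) := by
  induction I with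
  | nil => rfl
  | cons i t ih =>
    rw [List.foldr_cons, ih, pvStepB_eq, List.map_cons, pvNeed_cons]

-- ===== VERDICT =====
theorem solution_spec : Claim_equal_solution := by
  intro R V _ _
  unfold Spec_solution solution solution_alt
  have hrange : PySem.List.pyRange ((R.length : Int) - 1) (-1) (-1) =
      (PySem.List.pyRange 0 (R.length : Int) 1).reverse := by
    rw [PySem.List.pyRange_neg_one_eq_reverse]; norm_num
  rw [hrange, List.foldl_reverse, pvFoldB_eq, pvNeed_eq]
  have h0 : ((0, 0, 0, 0) : Int × Int × Int × Int) = (0, -(0 : Int), 0, 0) := by norm_num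
  rw [h0, pvFoldA_eq, pvFoldAB_eq _ 0 0 0 le_rfl (by norm_num)]
  have hm := pvM_nonpos ((PySem.List.pyRange 0 (R.length : Int) 1).map (pvDelta R V))
  have hmb := pvMB_nonpos ((PySem.List.pyRange 0 (R.length : Int) 1).map (pvDelta R V))
  simp only [zero_add, min_def]
  split_ifs <;> simp_all <;> omega
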